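-- pv_equiv track=rewrite | github.com/taruchit/HackerEarth | PracticeChallenge/BalancingStrings.py | Result
-- ===== SOURCE A (Python) =====
-- def Result(S):
--     K=0
--     for s in S:
--         if s=='(':
--             K=K+1
--         else:
--             K=K-1
--     '''
--     subStringList=list()
--     if K==1:
--         index=0
--
--         for s in S:
--             subString=S
--             if s == '(':
--                 temp=subString.replace('(','',index)
--                 subStringList.append(temp)
--                 index=index+1
--             else:
--                 index=index+1
--
--     else:
--         index=0
--
--         for s in S:
--             subString=S
--             if s == ')':
--                 temp=subString.replace(')','',index)
--                 subStringList.append(temp)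
--                 index=index+1
--             else:
--                 index=index+1
--
--     subStringSet=set()
--     subStringSet=set(subStringList)
--     res=len(subStringSet)
--     return res
--     '''
--     if K>0:
--         return K
--     else:
--         return K*(-1)
-- ===== SOURCE B (Python) =====
-- def Result(S):
--     # Divide and conquer: balance of a string is the sum of the balances
--     # of its two halves; the answer is the absolute value of the balance.
--     def bal(T):
--         n = len(T)
--         if n == 0:
--             return 0
--         if n == 1:
--             return 1 if T == '(' else -1
--         m = n // 2
--         return bal(T[:m]) + bal(T[m:])
--     return abs(bal(S))
-- ===== Notes on version B (the rewrite author's own statement) =====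
-- stated objective: alternative
-- what changed: Replaces A's linear running-counter loop by a recursive divide-and-conquer: the balance of a string is the sum of the balances of its two halves (base cases empty and single character), and the result is the absolute value of the total balance.
import Mathlib
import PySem

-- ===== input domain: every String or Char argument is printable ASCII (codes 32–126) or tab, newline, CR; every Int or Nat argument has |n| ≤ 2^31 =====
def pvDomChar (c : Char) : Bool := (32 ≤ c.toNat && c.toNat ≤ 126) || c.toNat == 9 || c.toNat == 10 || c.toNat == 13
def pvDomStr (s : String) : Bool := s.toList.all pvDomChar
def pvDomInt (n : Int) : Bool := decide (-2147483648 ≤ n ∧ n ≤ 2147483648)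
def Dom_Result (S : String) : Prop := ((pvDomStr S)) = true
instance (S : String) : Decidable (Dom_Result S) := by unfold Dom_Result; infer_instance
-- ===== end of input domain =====

-- B replaces A's running-counter loop by a recursive divide-and-conquer on halves; alternative decomposition, not claimed faster.

-- ===== PORT A =====
def Result (S : String) : Int :=
  let K := S.toList.foldl (fun K s => if s == '(' then K + 1 else K - 1) (0 : Int)
  if K > 0 then K else K * (-1)

-- ===== PORT B =====
-- bal T: 0 on empty, ±1 on a single char, otherwise bal of the two halves
-- (Python's T[:m] / T[m:] with 0 ≤ m ≤ len(T) are exactly take/drop).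
def pvBal (l : List Char) : Int :=
  match l with
  | [] => 0
  | [c] => if c == '(' then 1 else -1
  | a :: b :: rest =>
    let m := (a :: b :: rest).length / 2
    pvBal ((a :: b :: rest).take m) + pvBal ((a :: b :: rest).drop m)
termination_by l.length
decreasing_by
  · simp; omega
  · simp; omega

def Result_alt (S : String) : Int := |pvBal S.toList|

-- ===== PRECONDITION & SPEC =====
def Spec_Result (S : String) (out : Int) : Prop := out = Result_alt S
instance (S : String) (out : Int) : Decidable (Spec_Result S out) := by unfold Spec_Result; infer_instance

-- ===== CLAIM (what is proved, stated in full; the proofs are below) =====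
def Claim_equal_Result : Prop := ∀ (S : String), Dom_Result S → Spec_Result S (Result S)

-- ===== LEMMAS AND PROOFS =====

-- A's loop in closed form: final K = 2·(count '(') − length.
theorem foldl_balance (l : List Char) (a : Int) :
    l.foldl (fun K s => if s == '(' then K + 1 else K - 1) a
      = a + 2 * (l.count '(' : Int) - (l.length : Int) := by
  induction l generalizing a with
  | nil => simp
  | cons c t ih =>
      simp only [List.foldl_cons, List.count_cons, List.length_cons, ih]
      by_cases h : c = '(' <;> simp [h] <;> ring

-- B's recursion in the same closed form.
theorem pvBal_eq (l : List Char) : pvBal l = 2 * (l.count '(' : Int) - (l.length : Int) := by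
  induction l using pvBal.induct with
  | case1 => simp [pvBal]
  | case2 c h => rw [pvBal]; simp_all
  | case3 c h => rw [pvBal]; simp_all
  | case4 a b rest m ih1 ih2 =>
      rw [pvBal, ih1, ih2]
      have h1 : ((a::b::rest).take m).count '(' + ((a::b::rest).drop m).count '('
          = (a::b::rest).count '(' := by
        rw [← List.count_append, List.take_append_drop]
      have h2 : ((a::b::rest).take m).length + ((a::b::rest).drop m).length
          = (a::b::rest).length := by
        rw [← List.length_append, List.take_append_drop]
      push_cast [← h1, ← h2]
      ring

-- ===== VERDICT (by name: the statement is the Claim_ definition above) =====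
theorem Result_spec : Claim_equal_Result := by
  intro S _
  unfold Spec_Result Result Result_alt
  simp only [foldl_balance, pvBal_eq, zero_add]
  rcases abs_cases (2 * (S.toList.count '(' : Int) - (S.toList.length : Int)) with ⟨he, _⟩ | ⟨he, _⟩ <;>
    rw [he] <;> split_ifs <;> omega
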